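-- pv_equiv track=rewrite | github.com/sjmoon00/problem-solving | 프로그래머스/3/64062. 징검다리 건너기/징검다리 건너기.py | solution
-- ===== SOURCE A (Python) =====
-- def solution(stones, k):
--
--     left, right = 0, max(stones) + 1
--     while left <= right:
--         mid = (left + right) // 2
--
--         current_successive = 0
--         # max_successive = 0
--         for stone in stones:
--             if stone - mid < 0:
--                 current_successive += 1
--                 # max_successive = max(max_successive, current_successive)
--             else:
--                 current_successive = 0
--
--             if current_successive >= k:
--                 break
--
--         if current_successive >= k:
--             right = mid - 1
--         else:
--             left = mid + 1
--
--     return right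
-- ===== SOURCE B (Python) =====
-- def solution(stones, k):
--     cap = max(stones) + 1
--     return min((max(stones[i:i + k]) for i in range(len(stones) - k + 1)), default=cap)
-- ===== Notes on version B (the rewrite author's own statement) =====
-- stated objective: simpler
-- what changed: Replaced A's binary search over stone heights (each probe re-scanning the list counting consecutive low stones with an early break) by a direct minimum over all length-k windows of the window maximum, defaulting to max(stones)+1 when no length-k window exists.
-- intended difference: On inputs (with 1 <= k <= len(stones)) containing k consecutive stones all below -1 - impossible for the problem's positive heights - A returns a value clamped to its search range [0, max(stones)+1] (-1, or max(stones)+1 when max(stones) < -1) while B returns the true minimum over length-k windows of the window maximum, the quantity A's own probe brackets. — e.g. on solution([-3, -3], 1): A returns -2, B returns -3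
-- outside the precondition, e.g. on solution([3, 1], 0): A returns -1, B raises ValueError
import Mathlib
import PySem

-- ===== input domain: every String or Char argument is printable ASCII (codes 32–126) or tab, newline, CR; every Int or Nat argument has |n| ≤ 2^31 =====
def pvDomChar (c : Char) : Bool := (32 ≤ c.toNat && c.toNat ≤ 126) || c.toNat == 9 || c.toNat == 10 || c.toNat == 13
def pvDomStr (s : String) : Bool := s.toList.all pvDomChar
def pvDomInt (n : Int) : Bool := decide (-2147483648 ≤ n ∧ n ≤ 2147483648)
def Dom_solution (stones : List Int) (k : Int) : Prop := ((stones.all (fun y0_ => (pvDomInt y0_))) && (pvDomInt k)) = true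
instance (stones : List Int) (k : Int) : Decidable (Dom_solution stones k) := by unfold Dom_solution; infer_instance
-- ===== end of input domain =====

-- B replaces A's binary search over stone heights by the direct minimum over all length-k
-- windows of the window maximum (simpler, no search loop); equal on Pre_ outside D_, where
-- A returns a value clamped to its search range and B returns the window minimum itself.


-- ===== PORT A =====
-- the inner `for stone in stones:` loop: current_successive accumulator with the early `break`;
-- returns the final current_successive
def aScan (k mid : Int) : List Int → Int → Int
  | [], cs => cs
  | s :: rest, cs =>
      let cs' := if s - mid < 0 then cs + 1 else 0
      if k ≤ cs' then cs' else aScan k mid rest cs'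

-- the `while left <= right:` binary-search loop; returns right
def solGo (stones : List Int) (k left right : Int) : Int :=
  if h : left ≤ right then
    let mid := PySem.Int.floordiv (left + right) 2
    if k ≤ aScan k mid stones 0 then solGo stones k left (mid - 1)
    else solGo stones k (mid + 1) right
  else right
termination_by (right + 1 - left).toNat
decreasing_by
  all_goals
    have hb := PySem.Int.floordiv_two_mid_bounds (lo := left) (hi := right) h
    omega

def solution (stones : List Int) (k : Int) : Int :=
  -- max(stones): raises ValueError on []; [] is excluded by Pre_solution, .getD 0 is never used there
  solGo stones k 0 ((PySem.List.max? stones (fun y => y)).getD 0 + 1)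

-- ===== PORT B =====
-- min((max(stones[i:i+k]) for i in range(len(stones)-k+1)), default=cap) with cap = max(stones)+1:
-- the minimum over all length-k windows of the window maximum; when no length-k window exists
-- (k > len(stones)) nothing blocks any threshold and the cap is returned. max(stones) raises
-- ValueError on [] and max(stones[i:i+k]) raises on the empty windows of k <= 0: both are outside
-- Pre_solution, so the inner .getD 0 is never used there.
def solution_alt (stones : List Int) (k : Int) : Int :=
  let cap : Int := (PySem.List.max? stones (fun y => y)).getD 0 + 1
  PySem.List.minD
    ((PySem.List.pyRange 0 ((stones.length : Int) - k + 1) 1).map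
      (fun i => (PySem.List.max? (PySem.List.slice stones (some i) (some (i + k))) (fun y => y)).getD 0))
    (fun y => y) cap

-- ===== PRECONDITION & SPEC =====
-- Pre_ excludes stones = [], where A raises ValueError (max of an empty sequence, B too), and
-- k <= 0, where every slice stones[i:i+k] is empty so B raises ValueError (max of an empty
-- sequence) while A returns its search floor -1 (or max(stones)+1 when max(stones) < -1).
def Pre_solution (stones : List Int) (k : Int) : Prop :=
  stones ≠ [] ∧ 1 ≤ k
instance (stones : List Int) (k : Int) : Decidable (Pre_solution stones k) := by
  unfold Pre_solution; infer_instance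

def pvWitness_solution : List Int × Int := ([2, 4, 5, 3, 2, 1, 4, 2, 5, 1], 3)
-- On inputs with k consecutive stones all below -1 (impossible for the problem's positive
-- heights) A returns a value clamped to its search range [0, max(stones)+1] (-1, or
-- max(stones)+1 when max(stones) < -1) instead of the minimum over length-k windows of the
-- window maximum, which B returns and which is the quantity A's own probe brackets.
def D_solution (stones : List Int) (k : Int) : Prop :=
  1 ≤ k ∧ k ≤ (stones.length : Int) ∧
    ∃ i, i < stones.length ∧ (i + k.toNat ≤ stones.length ∧
      ∀ x ∈ (stones.drop i).take k.toNat, x < -1)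
instance (stones : List Int) (k : Int) : Decidable (D_solution stones k) := by
  unfold D_solution; infer_instance

def Spec_solution (stones : List Int) (k : Int) (out : Int) : Prop :=
  ¬ D_solution stones k → out = solution_alt stones k
instance (stones : List Int) (k : Int) (out : Int) : Decidable (Spec_solution stones k out) := by
  unfold Spec_solution; infer_instance

def pvDiffWitness_solution : List Int × Int := ([-3, -3], 1)
def pvDiffWitnessOut_solution : Int × Int := (-2, -3)

-- ===== CLAIM (what is proved, stated in full; the proofs are below) =====
def Claim_unchanged_solution : Prop := ∀ (stones : List Int) (k : Int), Dom_solution stones k → Pre_solution stones k → Spec_solution stones k (solution stones k)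
def Claim_changed_solution : Prop := Dom_solution (pvDiffWitness_solution.1) (pvDiffWitness_solution.2) ∧ Pre_solution (pvDiffWitness_solution.1) (pvDiffWitness_solution.2) ∧ D_solution (pvDiffWitness_solution.1) (pvDiffWitness_solution.2) ∧ solution (pvDiffWitness_solution.1) (pvDiffWitness_solution.2) = pvDiffWitnessOut_solution.1 ∧ solution_alt (pvDiffWitness_solution.1) (pvDiffWitness_solution.2) = pvDiffWitnessOut_solution.2 ∧ pvDiffWitnessOut_solution.1 ≠ pvDiffWitnessOut_solution.2
def Claim_exact_solution : Prop := ∀ (stones : List Int) (k : Int), Dom_solution stones k → Pre_solution stones k → D_solution stones k → solution stones k ≠ solution_alt stones k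

-- ===== LEMMAS AND PROOFS =====

-- length of the prefix of consecutive stones below mid
def runLen (mid : Int) : List Int → Nat
  | [] => 0
  | x :: xs => if x < mid then runLen mid xs + 1 else 0

-- some kn consecutive stones are all below mid
def hasWin (mid : Int) (kn : Nat) : List Int → Bool
  | [] => false
  | x :: xs => (decide (kn ≤ runLen mid (x :: xs))) || hasWin mid kn xs

lemma hasWin_cons (mid : Int) (kn : Nat) (x : Int) (xs : List Int) :
    hasWin mid kn (x :: xs) = true ↔ (kn ≤ runLen mid (x :: xs) ∨ hasWin mid kn xs = true) := by
  simp [hasWin]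

-- a front run of length at least kn (≥ 1) is itself a window
lemma runLen_hasWin (mid : Int) (kn : Nat) (h1 : 1 ≤ kn) :
    ∀ l : List Int, kn ≤ runLen mid l → hasWin mid kn l = true := by
  intro l h
  cases l with
  | nil => simp [runLen] at h; omega
  | cons x xs => exact (hasWin_cons mid kn x xs).mpr (Or.inl h)

lemma aScan_iff (k mid : Int) (hk : 1 ≤ k) :
    ∀ (l : List Int) (c : Int), 0 ≤ c → c < k →
      (k ≤ aScan k mid l c ↔ (k ≤ c + (runLen mid l : Int) ∨ hasWin mid k.toNat l = true)) := by
  intro l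
  induction l with
  | nil =>
    intro c hc hck
    simp only [aScan, runLen, hasWin, Nat.cast_zero, add_zero, Bool.false_eq_true, or_false]
  | cons x xs ih =>
    intro c hc hck
    by_cases hx : x < mid
    · have hrl : runLen mid (x :: xs) = runLen mid xs + 1 := by simp [runLen, hx]
      have e1 : aScan k mid (x :: xs) c = (if k ≤ c + 1 then c + 1 else aScan k mid xs (c + 1)) := by
        show (let cs' := if x - mid < 0 then c + 1 else 0;
              if k ≤ cs' then cs' else aScan k mid xs cs') = _
        rw [if_pos (show x - mid < 0 by omega)]
      rw [e1, hasWin_cons, hrl]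
      by_cases hb : k ≤ c + 1
      · rw [if_pos hb]
        have hr : (0 : Int) ≤ (runLen mid xs : Int) := Int.natCast_nonneg _
        exact ⟨fun _ => Or.inl (by push_cast; omega), fun _ => hb⟩
      · rw [if_neg hb, ih (c + 1) (by omega) (by omega)]
        constructor
        · rintro (h | h)
          · left; push_cast; omega
          · right; right; exact h
        · rintro (h | h | h)
          · left; push_cast at h ⊢; omega
          · left; omega
          · right; exact h
    · have hrl : runLen mid (x :: xs) = 0 := by simp [runLen, hx]
      have e1 : aScan k mid (x :: xs) c = aScan k mid xs 0 := by
        show (let cs' := if x - mid < 0 then c + 1 else 0;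
              if k ≤ cs' then cs' else aScan k mid xs cs') = _
        rw [if_neg (show ¬ (x - mid < 0) by omega), if_neg (show ¬ (k ≤ (0 : Int)) by omega)]
      rw [e1, ih 0 le_rfl (by omega), hasWin_cons, hrl]
      constructor
      · rintro (h | h)
        · exact Or.inr (Or.inr (runLen_hasWin mid k.toNat (by omega) xs (by omega)))
        · exact Or.inr (Or.inr h)
      · rintro (h | h | h)
        · exfalso; push_cast at h; omega
        · exfalso; omega
        · right; exact h

-- kn ≤ runLen mid l ↔ the first kn elements exist and are all < mid
lemma runLen_ge_iff (mid : Int) (kn : Nat) :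
    ∀ l : List Int, kn ≤ runLen mid l ↔ (kn ≤ l.length ∧ ∀ x ∈ l.take kn, x < mid) := by
  intro l
  induction l generalizing kn with
  | nil => simp [runLen]
  | cons x xs ih =>
    cases kn with
    | zero => simp
    | succ m =>
      by_cases hx : x < mid
      · simp only [runLen, if_pos hx, List.take, List.length_cons, List.mem_cons]
        rw [Nat.succ_le_succ_iff, Nat.succ_le_succ_iff, ih m]
        constructor
        · rintro ⟨h1, h2⟩
          exact ⟨h1, by rintro y (rfl | hy); exact hx; exact h2 y hy⟩
        · rintro ⟨h1, h2⟩
          exact ⟨h1, fun y hy => h2 y (Or.inr hy)⟩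
      · simp only [runLen, if_neg hx]
        constructor
        · omega
        · rintro ⟨_, h2⟩
          exact absurd (h2 x (by simp)) hx

-- hasWin ↔ some drop/take window of length kn is all < mid
lemma hasWin_iff (mid : Int) (kn : Nat) (hkn : 1 ≤ kn) :
    ∀ l : List Int, hasWin mid kn l = true ↔
      ∃ i : Nat, i + kn ≤ l.length ∧ ∀ x ∈ (l.drop i).take kn, x < mid := by
  intro l
  induction l with
  | nil =>
    simp [hasWin]
    omega
  | cons x xs ih =>
    simp only [hasWin, Bool.or_eq_true, decide_eq_true_eq, ih]
    constructor
    · rintro (h | ⟨i, h1, h2⟩)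
      · refine ⟨0, ?_, ?_⟩
        · have := (runLen_ge_iff mid kn (x :: xs)).mp h
          simpa using this.1
        · have := (runLen_ge_iff mid kn (x :: xs)).mp h
          simpa using this.2
      · exact ⟨i + 1, by simpa using by omega, by simpa using h2⟩
    · rintro ⟨i, h1, h2⟩
      cases i with
      | zero =>
        left
        rw [runLen_ge_iff]
        simp only [List.drop_zero] at h2
        exact ⟨by simpa using h1, h2⟩
      | succ j =>
        right
        exact ⟨j, by simp at h1 ⊢; omega, by simpa using h2⟩

-- ===== characterisation of B's value =====

-- B's value is a member of the maxima list and a lower bound of it; membership unfolds to windows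
lemma solution_alt_spec (stones : List Int) (k : Int)
    (hne : stones ≠ []) (hk1 : 1 ≤ k) (hk2 : k ≤ (stones.length : Int)) :
    (∃ i : Nat, (i : Int) + k ≤ (stones.length : Int) ∧
        (∃ m, PySem.List.max? ((stones.drop i).take k.toNat) (fun y => y) = some m ∧
          solution_alt stones k = m)) ∧
    (∀ i : Nat, (i : Int) + k ≤ (stones.length : Int) →
        ∀ m, PySem.List.max? ((stones.drop i).take k.toNat) (fun y => y) = some m →
          solution_alt stones k ≤ m) := by
  classical
  set n : Int := (stones.length : Int) with hn
  -- the slice at an admissible i is the drop/take window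
  have hslice : ∀ i : Int, 0 ≤ i → i < n - k + 1 →
      PySem.List.slice stones (some i) (some (i + k)) = (stones.drop i.toNat).take k.toNat := by
    intro i hi0 hi1
    rw [PySem.List.slice_toNat stones hi0 (by omega)]
    congr 1
    omega
  -- each window is nonempty, so max? is some
  have hwin_ne : ∀ i : Nat, (i : Int) + k ≤ n → ((stones.drop i).take k.toNat) ≠ [] := by
    intro i hi
    have hlen : ((stones.drop i).take k.toNat).length = min k.toNat (stones.length - i) := by
      simp
    intro hcon
    rw [hcon] at hlen
    simp at hlen
    omega
  -- the mapped list
  set f : Int → Int := fun i =>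
    (PySem.List.max? (PySem.List.slice stones (some i) (some (i + k))) (fun y => y)).getD 0 with hf
  set maxs : List Int := (PySem.List.pyRange 0 (n - k + 1) 1).map f with hmaxs
  have hmaxs_ne : maxs ≠ [] := by
    rw [hmaxs]
    simp only [ne_eq, List.map_eq_nil_iff]
    intro hcon
    have : (0 : Int) ∈ PySem.List.pyRange 0 (n - k + 1) 1 := by
      rw [PySem.List.mem_pyRange_one]
      exact ⟨le_refl 0, by omega⟩
    rw [hcon] at this
    simp at this
  obtain ⟨M, hM⟩ : ∃ M, PySem.List.min? maxs (fun y => y) = some M := by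
    cases hmm : PySem.List.min? maxs (fun y => y) with
    | none => exact absurd ((PySem.List.min?_eq_none_iff _ _).mp hmm) hmaxs_ne
    | some m => exact ⟨m, rfl⟩
  have halt : solution_alt stones k = M := by
    unfold solution_alt PySem.List.minD
    rw [← hn, ← hf, ← hmaxs, hM]
    rfl
  have hMmem : M ∈ maxs := PySem.List.min?_mem hM
  have hMmin : ∀ y ∈ maxs, M ≤ y := by
    intro y hy
    exact PySem.List.min?_isMin hM y hy
  constructor
  · -- M is f i for some admissible i
    rw [hmaxs] at hMmem
    obtain ⟨i, hi, hfi⟩ := List.mem_map.mp hMmem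
    rw [PySem.List.mem_pyRange_one] at hi
    obtain ⟨hi0, hi1⟩ := hi
    refine ⟨i.toNat, by omega, ?_⟩
    have hoeq : (i.toNat : Int) = i := by omega
    obtain ⟨m, hm⟩ : ∃ m, PySem.List.max? ((stones.drop i.toNat).take k.toNat) (fun y => y) = some m := by
      cases hmm : PySem.List.max? ((stones.drop i.toNat).take k.toNat) (fun y => y) with
      | none => exact absurd ((PySem.List.max?_eq_none_iff _ _).mp hmm) (hwin_ne i.toNat (by omega))
      | some m => exact ⟨m, rfl⟩
    refine ⟨m, hm, ?_⟩
    rw [halt, ← hfi, hf]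
    simp only
    rw [hslice i hi0 hi1, hm]
    rfl
  · intro i hi m hm
    rw [halt]
    apply hMmin
    rw [hmaxs]
    apply List.mem_map.mpr
    refine ⟨(i : Int), ?_, ?_⟩
    · rw [PySem.List.mem_pyRange_one]
      constructor
      · positivity
      · omega
    · rw [hf]
      simp only
      rw [hslice (i : Int) (by positivity) (by omega)]
      rw [Int.toNat_natCast, hm]
      rfl

-- B's value M satisfies:  mid exceeds M ↔ some length-k window is entirely below mid
lemma alt_lt_iff (stones : List Int) (k : Int)
    (hne : stones ≠ []) (hk1 : 1 ≤ k) (hk2 : k ≤ (stones.length : Int)) (mid : Int) :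
    (solution_alt stones k < mid ↔ hasWin mid k.toNat stones = true) := by
  obtain ⟨⟨i0, hi0, m0, hm0, heq0⟩, hlb⟩ := solution_alt_spec stones k hne hk1 hk2
  rw [hasWin_iff mid k.toNat (by omega)]
  constructor
  · intro hlt
    refine ⟨i0, by omega, ?_⟩
    intro x hx
    have := PySem.List.max?_isMax hm0 x hx
    simp only at this
    omega
  · rintro ⟨i, hi, hall⟩
    obtain ⟨m, hm⟩ : ∃ m, PySem.List.max? ((stones.drop i).take k.toNat) (fun y => y) = some m := by
      cases hmm : PySem.List.max? ((stones.drop i).take k.toNat) (fun y => y) with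
      | none =>
        exfalso
        have := (PySem.List.max?_eq_none_iff _ _).mp hmm
        have hlen : ((stones.drop i).take k.toNat).length = min k.toNat (stones.length - i) := by simp
        rw [this] at hlen
        simp at hlen
        omega
      | some m => exact ⟨m, rfl⟩
    have hmmem := PySem.List.max?_mem hm
    have hle := hlb i (by omega) m hm
    have := hall m hmmem
    omega

-- B's value is nonnegative and at most max(stones)
lemma alt_le_max (stones : List Int) (k : Int)
    (hne : stones ≠ []) (hk1 : 1 ≤ k) (hk2 : k ≤ (stones.length : Int)) :
    solution_alt stones k ≤ (PySem.List.max? stones (fun y => y)).getD 0 := by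
  obtain ⟨⟨i0, hi0, m0, hm0, heq0⟩, _⟩ := solution_alt_spec stones k hne hk1 hk2
  have hmmem := PySem.List.max?_mem hm0
  have hmem : m0 ∈ stones := by
    have h1 : m0 ∈ stones.drop i0 := List.mem_of_mem_take hmmem
    exact List.mem_of_mem_drop h1
  obtain ⟨mx, hmx⟩ : ∃ mx, PySem.List.max? stones (fun y => y) = some mx := by
    cases hmm : PySem.List.max? stones (fun y => y) with
    | none => exact absurd ((PySem.List.max?_eq_none_iff _ _).mp hmm) hne
    | some m => exact ⟨m, rfl⟩
  have hle := PySem.List.max?_isMax hmx m0 hmem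
  simp only at hle
  rw [heq0, hmx]
  exact hle

-- outside D_ (with 1 ≤ k ≤ len) B's value is at least -1, the floor of A's search range
lemma alt_ge_of_not_D (stones : List Int) (k : Int)
    (hne : stones ≠ []) (hk1 : 1 ≤ k) (hk2 : k ≤ (stones.length : Int))
    (hnD : ¬ D_solution stones k) : -1 ≤ solution_alt stones k := by
  by_contra hlt
  push_neg at hlt
  have hw := (alt_lt_iff stones k hne hk1 hk2 (-1)).mp hlt
  rw [hasWin_iff (-1) k.toNat (by omega)] at hw
  obtain ⟨i, hi, hall⟩ := hw
  exact hnD ⟨hk1, hk2, i, by omega, by omega, hall⟩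

-- when k > len(stones) there is no window: B returns the cap max(stones)+1
lemma alt_of_k_gt (stones : List Int) (k : Int) (hk : (stones.length : Int) < k) :
    solution_alt stones k = (PySem.List.max? stones (fun y => y)).getD 0 + 1 := by
  unfold solution_alt
  rw [PySem.List.pyRange_one_eq_nil (by omega)]
  rfl

-- the streak counter can never exceed its start plus the number of stones scanned
lemma aScan_le (k mid : Int) :
    ∀ (l : List Int) (c : Int), 0 ≤ c → aScan k mid l c ≤ c + (l.length : Int) := by
  intro l
  induction l with
  | nil => intro c hc; simp [aScan]
  | cons x xs ih =>
    intro c hc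
    simp only [aScan]
    split_ifs with h1 h2 h3 <;> simp only [List.length_cons] <;> push_cast
    · omega
    · have := ih (c + 1) (by omega); omega
    · omega
    · have := ih 0 le_rfl; omega

-- the binary search returns M whenever the probe brackets M on the search interval
lemma solGo_eq (stones : List Int) (k : Int) (M : Int) :
    ∀ L R : Int,
      (∀ mid, L ≤ mid → mid ≤ R → (k ≤ aScan k mid stones 0 ↔ M < mid)) →
      L ≤ M + 1 → M ≤ R → solGo stones k L R = M := by
  intro L R
  fun_induction solGo stones k L R with
  | case1 L R h mid hc ih =>
    intro hiff hL hR
    have hb := PySem.Int.floordiv_two_mid_bounds (lo := L) (hi := R) h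
    have := (hiff mid (by omega) (by omega)).mp hc
    exact ih (fun m h1 h2 => hiff m h1 (by omega)) hL (by omega)
  | case2 L R h mid hc ih =>
    intro hiff hL hR
    have hb := PySem.Int.floordiv_two_mid_bounds (lo := L) (hi := R) h
    have : ¬ (M < mid) := fun hlt => hc ((hiff mid (by omega) (by omega)).mpr hlt)
    exact ih (fun m h1 h2 => hiff m (by omega) h2) (by omega) hR
  | case3 L R h =>
    intro hiff hL hR
    omega

-- the binary search never returns less than left - 1 (when the interval is sensible)
lemma solGo_ge (stones : List Int) (k : Int) :
    ∀ L R : Int, L ≤ R + 1 → L - 1 ≤ solGo stones k L R := by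
  intro L R
  fun_induction solGo stones k L R with
  | case1 L R h mid hc ih =>
    intro hLR
    have hb := PySem.Int.floordiv_two_mid_bounds (lo := L) (hi := R) h
    have := ih (by omega)
    omega
  | case2 L R h mid hc ih =>
    intro hLR
    have hb := PySem.Int.floordiv_two_mid_bounds (lo := L) (hi := R) h
    have := ih (by omega)
    omega
  | case3 L R h =>
    intro hLR
    omega

-- ===== VERDICT (by name: the statement is the Claim_ definition above) =====
theorem solution_spec : Claim_unchanged_solution := by
  intro stones k _hdom hpre
  obtain ⟨hne, hk1⟩ := hpre
  unfold Spec_solution solution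
  intro hnD
  by_cases hk2 : k ≤ (stones.length : Int)
  · -- a genuine window size: both sides compute min over windows of the window max
    have hM1 := alt_ge_of_not_D stones k hne hk1 hk2 hnD
    have hMmx := alt_le_max stones k hne hk1 hk2
    refine solGo_eq stones k (solution_alt stones k) 0 _ ?_ (by omega) (by omega)
    intro mid _ _
    rw [aScan_iff k mid hk1 stones 0 le_rfl (by omega),
        alt_lt_iff stones k hne hk1 hk2 mid]
    constructor
    · rintro (h | h)
      · exact runLen_hasWin mid k.toNat (by omega) stones (by omega)
      · exact h
    · intro h
      right; exact h
  · -- k > len(stones): no window blocks any probe, both sides return max(stones)+1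
    rw [alt_of_k_gt stones k (by omega)]
    set mx : Int := (PySem.List.max? stones (fun y => y)).getD 0 with hmx
    by_cases h0 : (0 : Int) ≤ mx + 1
    · refine solGo_eq stones k (mx + 1) 0 _ ?_ (by omega) (by omega)
      intro mid h1 h2
      have := aScan_le k mid stones 0 le_rfl
      constructor
      · intro h; omega
      · intro h; omega
    · rw [solGo.eq_def, dif_neg h0]

theorem solution_changed : Claim_changed_solution := by
  unfold Claim_changed_solution
  refine ⟨by decide, by decide, by decide, ?_, by decide, by decide⟩
  show solution [-3, -3] 1 = -2
  have h1 : solution [-3, -3] 1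
      = solGo [-3, -3] 1 0 ((PySem.List.max? [-3, -3] (fun y => y)).getD 0 + 1) := rfl
  have h2 : ((PySem.List.max? [-3, -3] (fun y => y)).getD 0 + 1 : Int) = -2 := by decide
  rw [h1, h2, solGo.eq_def]
  norm_num

theorem solution_tight : Claim_exact_solution := by
  intro stones k _hdom hpre hD
  obtain ⟨hne, hk1⟩ := hpre
  obtain ⟨_, hk2, i, hi, hik, hall⟩ := hD
  have hM : solution_alt stones k < -1 := by
    rw [alt_lt_iff stones k hne hk1 hk2 (-1), hasWin_iff (-1) k.toNat (by omega)]
    exact ⟨i, hik, hall⟩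
  have hMmx := alt_le_max stones k hne hk1 hk2
  unfold solution
  set mx : Int := (PySem.List.max? stones (fun y => y)).getD 0 with hmx
  by_cases h0 : (0 : Int) ≤ mx + 1
  · have := solGo_ge stones k 0 (mx + 1) (by omega)
    omega
  · have : solGo stones k 0 (mx + 1) = mx + 1 := by
      rw [solGo.eq_def, dif_neg h0]
    omega
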